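-- pv_equiv track=rewrite | github.com/JiexingQi/codalab_spider | text-to-sql/seq2seq/utils/lgerels2t5rels.py | mul_mul_match
-- ===== SOURCE A (Python) =====
-- import itertools
--
-- def mul_mul_match(t5_toks_list,  question_toks_list):
--     """"match two list of question toks"""
--     t5_index = [i for i in range(1, len(t5_toks_list)+1)]
--     question_index = [i for i in range(1, len(question_toks_list)+1)]
--     index_pair = list(itertools.product(t5_index, question_index))
--     for i, j in index_pair:
--         t5_toks = "".join(t5_toks_list[:i])
--         question_toks = "".join(question_toks_list[:j])
--         if t5_toks == question_toks:
--             return i, j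
--     return -1,-1
-- ===== SOURCE B (Python) =====
-- def mul_mul_match(t5_toks_list, question_toks_list):
--     """match two list of question toks"""
--     # map each distinct question-prefix concatenation to the smallest j producing it
--     first_j = {}
--     acc = ""
--     for j, tok in enumerate(question_toks_list, 1):
--         acc += tok
--         if acc not in first_j:
--             first_j[acc] = j
--     # scan t5 prefixes in increasing i; first hit is A's lexicographically first pair
--     acc = ""
--     for i, tok in enumerate(t5_toks_list, 1):
--         acc += tok
--         j = first_j.get(acc)
--         if j is not None:
--             return i, j
--     return -1, -1
-- ===== Notes on version B (the rewrite author's own statement) =====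
-- stated objective: faster
-- what changed: A scans the full cartesian product of (t5 prefix, question prefix) pairs, re-joining both prefixes for every pair; B builds the question-prefix concatenations once into a dict mapping each distinct prefix string to its smallest index j, then makes a single pass over t5 prefixes with a dict lookup.
import Mathlib
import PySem

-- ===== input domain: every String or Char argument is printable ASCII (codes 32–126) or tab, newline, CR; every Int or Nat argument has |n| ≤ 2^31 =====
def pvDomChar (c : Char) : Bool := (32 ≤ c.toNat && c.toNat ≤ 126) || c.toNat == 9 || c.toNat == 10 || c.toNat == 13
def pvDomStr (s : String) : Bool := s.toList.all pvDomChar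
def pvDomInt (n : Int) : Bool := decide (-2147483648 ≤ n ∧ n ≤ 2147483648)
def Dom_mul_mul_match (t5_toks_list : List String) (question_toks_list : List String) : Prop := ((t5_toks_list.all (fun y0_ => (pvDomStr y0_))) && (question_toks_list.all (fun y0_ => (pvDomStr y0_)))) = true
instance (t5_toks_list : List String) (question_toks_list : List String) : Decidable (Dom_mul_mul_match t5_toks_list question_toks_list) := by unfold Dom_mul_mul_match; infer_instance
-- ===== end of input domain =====

-- B replaces A's scan over the full cartesian product of prefix pairs by a dict from each
-- distinct question-prefix concatenation to its smallest j, then a single scan over t5 prefixes.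

-- ===== PORT A =====
-- "".join(xs)
def pvJoin (xs : List String) : String := PySem.Str.join "" xs

-- the 'for i, j in index_pair: … return i, j' loop (early return = first hit)
def pvLoopA (t5 q : List String) : List (Int × Int) → Int × Int
  | [] => (-1, -1)
  | (i, j) :: rest =>
      if pvJoin (PySem.List.slice t5 none (some i)) = pvJoin (PySem.List.slice q none (some j))
      then (i, j) else pvLoopA t5 q rest

def mul_mul_match (t5_toks_list : List String) (question_toks_list : List String) : Int × Int :=
  let t5_index := PySem.List.pyRange 1 ((t5_toks_list.length : Int) + 1) 1
  let question_index := PySem.List.pyRange 1 ((question_toks_list.length : Int) + 1) 1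
  let index_pair := t5_index.flatMap (fun i => question_index.map (fun j => (i, j)))
  pvLoopA t5_toks_list question_toks_list index_pair

-- ===== PORT B =====
-- one step of the dict-building loop: acc += tok; if acc not in first_j: first_j[acc] = j
def pvBuildStep (p : String × PySem.Dict String Int) (e : Int × String) : String × PySem.Dict String Int :=
  let acc := p.1 ++ e.2
  if p.2.contains acc then (acc, p.2) else (acc, p.2.insert acc e.1)

-- the scan over t5 prefixes with dict lookup (early return = first hit)
def pvScanB (d : PySem.Dict String Int) : String → List (Int × String) → Int × Int
  | _, [] => (-1, -1)
  | acc, (i, tok) :: rest =>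
      let acc' := acc ++ tok
      match d.get? acc' with
      | some j => (i, j)
      | none => pvScanB d acc' rest

def mul_mul_match_alt (t5_toks_list : List String) (question_toks_list : List String) : Int × Int :=
  let first_j := ((PySem.List.enumerate question_toks_list 1).foldl pvBuildStep ("", PySem.Dict.empty)).2
  pvScanB first_j "" (PySem.List.enumerate t5_toks_list 1)

-- ===== PRECONDITION & SPEC =====
def Spec_mul_mul_match (t5_toks_list : List String) (question_toks_list : List String) (out : Int × Int) : Prop := out = mul_mul_match_alt t5_toks_list question_toks_list
instance (t5_toks_list : List String) (question_toks_list : List String) (out : Int × Int) : Decidable (Spec_mul_mul_match t5_toks_list question_toks_list out) := by unfold Spec_mul_mul_match; infer_instance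

-- ===== CLAIM (what is proved, stated in full; the proofs are below) =====
def Claim_equal_mul_mul_match : Prop := ∀ (t5_toks_list : List String) (question_toks_list : List String), Dom_mul_mul_match t5_toks_list question_toks_list → Spec_mul_mul_match t5_toks_list question_toks_list (mul_mul_match t5_toks_list question_toks_list)

-- ===== LEMMAS AND PROOFS =====

-- first j (counting from j0) such that acc concatenated with a prefix of l equals s
def pvFindJ (s : String) : String → Int → List String → Option Int
  | _, _, [] => none
  | acc, j, t :: rest =>
      if acc ++ t = s then some j else pvFindJ s (acc ++ t) (j + 1) rest

-- the common shape both programs reduce to: scan t5 suffix, pairing each prefix with pvFindJ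
def pvCommon (q : List String) : String → Int → List String → Int × Int
  | _, _, [] => (-1, -1)
  | acc, i, t :: rest =>
      match pvFindJ (acc ++ t) "" 1 q with
      | some j => (i, j)
      | none => pvCommon q (acc ++ t) (i + 1) rest

theorem toList_pvJoin (xs : List String) : (pvJoin xs).toList = (xs.map String.toList).flatten := by
  rw [pvJoin, PySem.Str.toList_join]
  show ([].intercalate _) = _
  rw [List.intercalate]
  induction (xs.map String.toList) with
  | nil => simp
  | cons a l ih =>
    cases l with
    | nil => simp
    | cons b m => simp_all [List.intersperse]

theorem pvJoin_append_singleton (xs : List String) (t : String) :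
    pvJoin (xs ++ [t]) = pvJoin xs ++ t := by
  apply String.toList_inj.mp
  simp [toList_pvJoin]

theorem pvJoin_nil : pvJoin [] = "" := rfl

-- dict invariant: lookup in the built dict is first-match over the remaining tokens
theorem pvBuild_get? (l : List String) : ∀ (acc : String) (d : PySem.Dict String Int) (j0 : Int) (s : String),
    ((PySem.List.enumerate l j0).foldl pvBuildStep (acc, d)).2.get? s
      = (d.get? s).or (pvFindJ s acc j0 l) := by
  induction l with
  | nil => intro acc d j0 s; simp [PySem.List.enumerate_nil, pvFindJ]
  | cons t rest ih =>
    intro acc d j0 s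
    rw [PySem.List.enumerate_cons, List.foldl_cons]
    show ((PySem.List.enumerate rest (j0+1)).foldl pvBuildStep (pvBuildStep (acc, d) (j0, t))).2.get? s = _
    rw [pvBuildStep]
    by_cases hc : d.contains (acc ++ t) = true
    · simp only [hc, if_true]
      rw [ih, pvFindJ]
      by_cases hs : acc ++ t = s
      · subst hs
        rw [PySem.Dict.contains_eq_isSome_get?] at hc
        cases hg : d.get? (acc ++ t) with
        | none => rw [hg] at hc; simp at hc
        | some v => simp
      · simp [hs]
    · simp only [Bool.not_eq_true] at hc
      simp only [hc, Bool.false_eq_true, if_false]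
      rw [ih, pvFindJ, PySem.Dict.get?_insert]
      have hd : d.get? (acc ++ t) = none := by
        rw [PySem.Dict.contains_eq_isSome_get?] at hc
        cases hg : d.get? (acc ++ t) with
        | none => rfl
        | some v => rw [hg] at hc; simp at hc
      by_cases hs : s = acc ++ t
      · subst hs; simp [hd]
      · have hs' : ¬ acc ++ t = s := fun hh => hs hh.symm
        rw [if_neg hs, if_neg hs']

-- B's scan is pvCommon
theorem pvScanB_eq_common (q : List String) (l : List String) :
    ∀ (acc : String) (i0 : Int),
    pvScanB ((PySem.List.enumerate q 1).foldl pvBuildStep ("", PySem.Dict.empty)).2 acc (PySem.List.enumerate l i0)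
      = pvCommon q acc i0 l := by
  induction l with
  | nil => intro acc i0; simp [PySem.List.enumerate_nil, pvScanB, pvCommon]
  | cons t rest ih =>
    intro acc i0
    rw [PySem.List.enumerate_cons]
    rw [pvScanB, pvCommon]
    rw [pvBuild_get?]
    simp only [PySem.Dict.get?_empty, Option.or]
    cases pvFindJ (acc ++ t) "" 1 q with
    | some j => rfl
    | none => exact ih (acc ++ t) (i0 + 1)

-- unrolling A's flattened product: one inner block at a time
def pvInner (t5 q : List String) (i : Int) : List Int → Option Int
  | [] => none
  | j :: js =>
      if pvJoin (PySem.List.slice t5 none (some i)) = pvJoin (PySem.List.slice q none (some j))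
      then some j else pvInner t5 q i js

theorem pvLoopA_block (t5 q : List String) (i : Int) (js : List Int) (tail : List (Int × Int)) :
    pvLoopA t5 q (js.map (fun j => (i, j)) ++ tail)
      = match pvInner t5 q i js with
        | some j => (i, j)
        | none => pvLoopA t5 q tail := by
  induction js with
  | nil => simp [pvInner]
  | cons j js ih =>
    rw [List.map_cons, List.cons_append, pvLoopA, pvInner]
    split_ifs with h
    · simp
    · rw [ih]

theorem slice_take (xs : List String) (k : Nat) :
    PySem.List.slice xs none (some ((k : Nat) : Int)) = xs.take k :=
  PySem.List.slice_to_natCast xs k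

-- A's inner scan over question_index is pvFindJ
theorem pvInner_eq_findJ (t5 q : List String) (i : Int) (s : String)
    (hs : s = pvJoin (PySem.List.slice t5 none (some i))) :
    ∀ (l pre : List String), q = pre ++ l →
    pvInner t5 q i (PySem.List.pyRange ((pre.length : Int) + 1) ((q.length : Int) + 1) 1)
      = pvFindJ s (pvJoin pre) ((pre.length : Int) + 1) l := by
  intro l
  induction l with
  | nil =>
    intro pre hq
    subst hq
    rw [pvFindJ, List.append_nil, PySem.List.pyRange_one_eq_nil (by omega), pvInner]
  | cons t rest ih =>
    intro pre hq
    have hlen : ((pre.length : Int) + 1) < (q.length : Int) + 1 := by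
      have := congrArg List.length hq
      simp at this
      omega
    rw [PySem.List.pyRange_one_cons hlen, pvInner, pvFindJ]
    have hsl : PySem.List.slice q none (some ((pre.length : Int) + 1)) = pre ++ [t] := by
      have : ((pre.length : Int) + 1) = (((pre.length + 1 : Nat)) : Int) := by push_cast; ring
      rw [this, slice_take, hq]
      simp [List.take_append]
    rw [hsl, pvJoin_append_singleton, ← hs]
    by_cases h : pvJoin pre ++ t = s
    · rw [if_pos h.symm, if_pos h]
    · have h' : ¬ s = pvJoin pre ++ t := fun hh => h hh.symm
      rw [if_neg h', if_neg h]
      have hq' : q = (pre ++ [t]) ++ rest := by rw [hq]; simp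
      have hrec := ih (pre ++ [t]) hq'
      have hcast : ((List.length (pre ++ [t]) : Int) + 1) = (pre.length : Int) + 1 + 1 := by
        push_cast [List.length_append, List.length_cons, List.length_nil]; ring
      rw [hcast, pvJoin_append_singleton] at hrec
      exact hrec

-- A is pvCommon
theorem pvLoopA_eq_common (t5 q : List String) :
    ∀ (l pre : List String), t5 = pre ++ l →
    pvLoopA t5 q ((PySem.List.pyRange ((pre.length : Int) + 1) ((t5.length : Int) + 1) 1).flatMap
        (fun i => (PySem.List.pyRange 1 ((q.length : Int) + 1) 1).map (fun j => (i, j))))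
      = pvCommon q (pvJoin pre) ((pre.length : Int) + 1) l := by
  intro l
  induction l with
  | nil =>
    intro pre ht
    have h0 : t5.length = pre.length := by rw [ht]; simp
    rw [show PySem.List.pyRange ((pre.length : Int) + 1) ((t5.length : Int) + 1) 1 = [] from
      PySem.List.pyRange_one_eq_nil (by omega)]
    simp [pvLoopA, pvCommon]
  | cons t rest ih =>
    intro pre ht
    have hlen : ((pre.length : Int) + 1) < (t5.length : Int) + 1 := by
      have := congrArg List.length ht
      simp at this
      omega
    rw [PySem.List.pyRange_one_cons hlen, List.flatMap_cons, pvLoopA_block, pvCommon]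
    have hsl : PySem.List.slice t5 none (some ((pre.length : Int) + 1)) = pre ++ [t] := by
      have : ((pre.length : Int) + 1) = (((pre.length + 1 : Nat)) : Int) := by push_cast; ring
      rw [this, slice_take, ht]
      simp [List.take_append]
    have hinner := pvInner_eq_findJ t5 q ((pre.length : Int) + 1)
      (pvJoin (PySem.List.slice t5 none (some ((pre.length : Int) + 1)))) rfl q [] rfl
    simp only [pvJoin_nil] at hinner
    have h1 : ((List.length ([] : List String) : Int) + 1) = (1 : Int) := by simp
    rw [h1] at hinner
    rw [hsl, pvJoin_append_singleton] at hinner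
    rw [hinner]
    cases pvFindJ (pvJoin pre ++ t) "" 1 q with
    | some j => rfl
    | none =>
      have ht' : t5 = (pre ++ [t]) ++ rest := by rw [ht]; simp
      have hrec := ih (pre ++ [t]) ht'
      have hcast : ((List.length (pre ++ [t]) : Int) + 1) = (pre.length : Int) + 1 + 1 := by
        push_cast [List.length_append, List.length_cons, List.length_nil]; ring
      rw [hcast, pvJoin_append_singleton] at hrec
      exact hrec

-- ===== VERDICT (by name: the statement is the Claim_ definition above) =====
theorem mul_mul_match_spec : Claim_equal_mul_mul_match := by
  intro t5 q _
  show mul_mul_match t5 q = mul_mul_match_alt t5 q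
  rw [mul_mul_match, mul_mul_match_alt]
  have hA := pvLoopA_eq_common t5 q t5 [] rfl
  have hB := pvScanB_eq_common q t5 "" 1
  simp only [List.length_nil, Nat.cast_zero, zero_add, pvJoin_nil] at hA
  rw [hA, hB]
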